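-- pv_equiv track=rewrite | github.com/barkhatnat/ITMO_UNIVERSITY | 2_Semester/Algorithms/lab1/13(1.5 points)/task_13_1.py | isThereASubsets
-- ===== SOURCE A (Python) =====
-- def isThereASubsets(S, n, a, b, c):
--     if a == 0 and b == 0 and c == 0:
--         return True
--     if n < 0:
--         return False
--     part_a = False
--     if a - S[n] >= 0:
--         part_a = isThereASubsets(S, n - 1, a - S[n], b, c)
--     part_b = False
--     if not part_a and (b - S[n] >= 0):
--         part_b = isThereASubsets(S, n - 1, a, b - S[n], c)
--     part_c = False
--     if (not part_a and not part_b) and (c - S[n] >= 0):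
--         part_c = isThereASubsets(S, n - 1, a, b, c - S[n])
--     return part_a or part_b or part_c
-- ===== SOURCE B (Python) =====
-- def isThereASubsets(S, n, a, b, c):
--     # Breadth-first sweep over the set of reachable (a, b, c) target states, one element at a time,
--     # merging recursion paths that reach the same state.
--     states = {(a, b, c)}
--     i = n
--     while i >= 0:
--         if (0, 0, 0) in states:
--             return True
--         if not states:
--             return False
--         x = S[i]
--         nxt = set()
--         for (p, q, r) in states:
--             if p - x >= 0:
--                 nxt.add((p - x, q, r))
--             if q - x >= 0:
--                 nxt.add((p, q - x, r))
--             if r - x >= 0: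
--                 nxt.add((p, q, r - x))
--         states = nxt
--         i -= 1
--     return (0, 0, 0) in states
-- ===== Notes on version B (the rewrite author's own statement) =====
-- stated objective: alternative
-- what changed: Replaced the three-way branching recursion by an iterative breadth-first sweep that maintains the set of reachable (a,b,c) target states, merging recursion paths that reach the same state (a large win only when many subset sums coincide).
import Mathlib
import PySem

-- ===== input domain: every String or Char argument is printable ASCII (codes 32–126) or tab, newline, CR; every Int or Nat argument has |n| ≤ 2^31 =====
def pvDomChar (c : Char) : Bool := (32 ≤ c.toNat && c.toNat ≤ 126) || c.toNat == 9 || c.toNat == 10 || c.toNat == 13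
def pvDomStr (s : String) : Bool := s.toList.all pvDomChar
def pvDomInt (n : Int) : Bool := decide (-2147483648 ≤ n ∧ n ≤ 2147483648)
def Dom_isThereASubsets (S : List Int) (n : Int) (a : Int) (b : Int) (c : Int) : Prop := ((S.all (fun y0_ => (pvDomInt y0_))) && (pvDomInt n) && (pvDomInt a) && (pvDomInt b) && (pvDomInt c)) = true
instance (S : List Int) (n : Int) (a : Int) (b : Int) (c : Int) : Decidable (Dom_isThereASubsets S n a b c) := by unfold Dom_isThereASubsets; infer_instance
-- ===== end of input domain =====

-- B replaces A's three-way branching recursion by an iterative sweep over the SET of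
-- reachable (a,b,c) target states, merging recursion paths that reach the same state.

-- ===== PORT A =====
def isThereASubsets (S : List Int) (n : Int) (a : Int) (b : Int) (c : Int) : Bool :=
  if a = 0 ∧ b = 0 ∧ c = 0 then true
  else if _hn : n < 0 then false
  else
    -- S[n]: n is a valid nonnegative index under Pre_; outside Pre_ Python raises (default 0 here)
    let x := (PySem.List.pyGet? S n).getD 0
    let part_a := if a - x ≥ 0 then isThereASubsets S (n - 1) (a - x) b c else false
    let part_b := if ¬ part_a = true ∧ b - x ≥ 0 then isThereASubsets S (n - 1) a (b - x) c else false
    let part_c := if (¬ part_a = true ∧ ¬ part_b = true) ∧ c - x ≥ 0 then isThereASubsets S (n - 1) a b (c - x) else false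
    part_a || part_b || part_c
termination_by (n + 1).toNat
decreasing_by all_goals omega

-- ===== PORT B =====
-- one pass of the loop body: all guarded successor states of every state in `states`
def altStep (x : Int) (states : PySem.Set (Int × Int × Int)) : PySem.Set (Int × Int × Int) :=
  states.foldl (fun nxt t =>
    let nxt := if t.1 - x ≥ 0 then PySem.Set.add nxt (t.1 - x, t.2.1, t.2.2) else nxt
    let nxt := if t.2.1 - x ≥ 0 then PySem.Set.add nxt (t.1, t.2.1 - x, t.2.2) else nxt
    if t.2.2 - x ≥ 0 then PySem.Set.add nxt (t.1, t.2.1, t.2.2 - x) else nxt)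
    PySem.Set.empty

def altLoop (S : List Int) (i : Int) (states : PySem.Set (Int × Int × Int)) : Bool :=
  if _h : i ≥ 0 then
    if PySem.Set.contains states (0, 0, 0) then true
    else if states.isEmpty then false
    else altLoop S (i - 1) (altStep ((PySem.List.pyGet? S i).getD 0) states)
  else PySem.Set.contains states (0, 0, 0)
termination_by (i + 1).toNat
decreasing_by omega

def isThereASubsets_alt (S : List Int) (n : Int) (a : Int) (b : Int) (c : Int) : Bool :=
  altLoop S n (PySem.Set.ofList [(a, b, c)])

-- ===== PRECONDITION & SPEC =====
-- Pre_ excludes exactly the inputs where Python A raises IndexError: n ≥ len(S) with targets not all zero.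
def Pre_isThereASubsets (S : List Int) (n : Int) (a : Int) (b : Int) (c : Int) : Prop :=
  (a = 0 ∧ b = 0 ∧ c = 0) ∨ n < (S.length : Int)
instance (S : List Int) (n : Int) (a : Int) (b : Int) (c : Int) : Decidable (Pre_isThereASubsets S n a b c) := by unfold Pre_isThereASubsets; infer_instance

def pvWitness_isThereASubsets : List Int × Int × Int × Int × Int := ([1, 2, 3], 2, 1, 2, 3)

def Spec_isThereASubsets (S : List Int) (n : Int) (a : Int) (b : Int) (c : Int) (out : Bool) : Prop := out = isThereASubsets_alt S n a b c
instance (S : List Int) (n : Int) (a : Int) (b : Int) (c : Int) (out : Bool) : Decidable (Spec_isThereASubsets S n a b c out) := by unfold Spec_isThereASubsets; infer_instance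

-- ===== CLAIM (what is proved, stated in full; the proofs are below) =====
def Claim_equal_isThereASubsets : Prop := ∀ (S : List Int) (n : Int) (a : Int) (b : Int) (c : Int), Dom_isThereASubsets S n a b c → Pre_isThereASubsets S n a b c → Spec_isThereASubsets S n a b c (isThereASubsets S n a b c)

-- ===== LEMMAS AND PROOFS =====

lemma A_zero (S : List Int) (n : Int) : isThereASubsets S n 0 0 0 = true := by
  rw [isThereASubsets]; simp

lemma A_neg (S : List Int) (n a b c : Int) (hz : ¬ (a = 0 ∧ b = 0 ∧ c = 0)) (hn : n < 0) :
    isThereASubsets S n a b c = false := by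
  rw [isThereASubsets]; simp [hz, hn]

lemma A_step (S : List Int) (n a b c : Int) (hz : ¬ (a = 0 ∧ b = 0 ∧ c = 0)) (hn : 0 ≤ n) :
    isThereASubsets S n a b c =
      ((decide (a - (PySem.List.pyGet? S n).getD 0 ≥ 0) &&
          isThereASubsets S (n - 1) (a - (PySem.List.pyGet? S n).getD 0) b c) ||
       (decide (b - (PySem.List.pyGet? S n).getD 0 ≥ 0) &&
          isThereASubsets S (n - 1) a (b - (PySem.List.pyGet? S n).getD 0) c) ||
       (decide (c - (PySem.List.pyGet? S n).getD 0 ≥ 0) &&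
          isThereASubsets S (n - 1) a b (c - (PySem.List.pyGet? S n).getD 0))) := by
  conv_lhs => rw [isThereASubsets]
  have hn' : ¬ n < 0 := by omega
  simp only [hz, hn', if_false, if_true, ite_false, dif_neg, dite_false]
  set x := (PySem.List.pyGet? S n).getD 0 with hx
  by_cases h1 : a - x ≥ 0 <;> by_cases h2 : b - x ≥ 0 <;> by_cases h3 : c - x ≥ 0 <;>
    cases hra : isThereASubsets S (n - 1) (a - x) b c <;>
    cases hrb : isThereASubsets S (n - 1) a (b - x) c <;>
    cases hrc : isThereASubsets S (n - 1) a b (c - x) <;>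
    simp [h1, h2, h3, hra, hrb, hrc] <;>
    (by_cases hxa : x ≤ a <;> by_cases hxb : x ≤ b <;> by_cases hxc : x ≤ c <;>
      simp [hxa, hxb, hxc, lt_iff_not_ge])

-- membership in one pass of B's loop body
lemma A_step' (S : List Int) (n a b c : Int) (hz : ¬ (a = 0 ∧ b = 0 ∧ c = 0)) (hn : 0 ≤ n) :
    isThereASubsets S n a b c = true ↔
      ((a - (PySem.List.pyGet? S n).getD 0 ≥ 0 ∧
          isThereASubsets S (n - 1) (a - (PySem.List.pyGet? S n).getD 0) b c = true) ∨
       (b - (PySem.List.pyGet? S n).getD 0 ≥ 0 ∧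
          isThereASubsets S (n - 1) a (b - (PySem.List.pyGet? S n).getD 0) c = true) ∨
       (c - (PySem.List.pyGet? S n).getD 0 ≥ 0 ∧
          isThereASubsets S (n - 1) a b (c - (PySem.List.pyGet? S n).getD 0) = true)) := by
  rw [A_step S n a b c hz hn]
  simp only [Bool.or_eq_true, Bool.and_eq_true, decide_eq_true_eq]
  tauto

lemma mem_body (x : Int) (acc : PySem.Set (Int × Int × Int)) (t y : Int × Int × Int) :
    (y ∈ (let nxt := if t.1 - x ≥ 0 then PySem.Set.add acc (t.1 - x, t.2.1, t.2.2) else acc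
          let nxt := if t.2.1 - x ≥ 0 then PySem.Set.add nxt (t.1, t.2.1 - x, t.2.2) else nxt
          if t.2.2 - x ≥ 0 then PySem.Set.add nxt (t.1, t.2.1, t.2.2 - x) else nxt)) ↔
      y ∈ acc ∨ ((t.1 - x ≥ 0 ∧ y = (t.1 - x, t.2.1, t.2.2)) ∨
                 (t.2.1 - x ≥ 0 ∧ y = (t.1, t.2.1 - x, t.2.2)) ∨
                 (t.2.2 - x ≥ 0 ∧ y = (t.1, t.2.1, t.2.2 - x))) := by
  by_cases h1 : t.1 - x ≥ 0 <;> by_cases h2 : t.2.1 - x ≥ 0 <;> by_cases h3 : t.2.2 - x ≥ 0 <;>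
    simp only [h1, h2, h3, if_true, if_false, PySem.Set.mem_add] <;> tauto

lemma mem_altStep (x : Int) (T : PySem.Set (Int × Int × Int)) (y : Int × Int × Int) :
    y ∈ altStep x T ↔ ∃ t ∈ T, (t.1 - x ≥ 0 ∧ y = (t.1 - x, t.2.1, t.2.2)) ∨
                                (t.2.1 - x ≥ 0 ∧ y = (t.1, t.2.1 - x, t.2.2)) ∨
                                (t.2.2 - x ≥ 0 ∧ y = (t.1, t.2.1, t.2.2 - x)) := by
  unfold altStep
  have gen : ∀ (L : List (Int × Int × Int)) (acc : PySem.Set (Int × Int × Int)),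
      y ∈ L.foldl (fun nxt t =>
        let nxt := if t.1 - x ≥ 0 then PySem.Set.add nxt (t.1 - x, t.2.1, t.2.2) else nxt
        let nxt := if t.2.1 - x ≥ 0 then PySem.Set.add nxt (t.1, t.2.1 - x, t.2.2) else nxt
        if t.2.2 - x ≥ 0 then PySem.Set.add nxt (t.1, t.2.1, t.2.2 - x) else nxt) acc ↔
      y ∈ acc ∨ ∃ t ∈ L, (t.1 - x ≥ 0 ∧ y = (t.1 - x, t.2.1, t.2.2)) ∨
                          (t.2.1 - x ≥ 0 ∧ y = (t.1, t.2.1 - x, t.2.2)) ∨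
                          (t.2.2 - x ≥ 0 ∧ y = (t.1, t.2.1, t.2.2 - x)) := by
    intro L
    induction L with
    | nil => simp
    | cons t L ih =>
      intro acc
      simp only [List.foldl_cons, ih, mem_body, List.mem_cons]
      constructor
      · rintro ((h | h) | ⟨u, hu, hp⟩)
        · exact Or.inl h
        · exact Or.inr ⟨t, Or.inl rfl, h⟩
        · exact Or.inr ⟨u, Or.inr hu, hp⟩
      · rintro (h | ⟨u, (rfl | hu), hp⟩)
        · exact Or.inl (Or.inl h)
        · exact Or.inl (Or.inr hp)
        · exact Or.inr ⟨u, hu, hp⟩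
  rw [gen]; simp [PySem.Set.empty]

-- the key semantic step: pushing every state of T through one element preserves "some state solvable"
lemma exists_A_succ (S : List Int) (i : Int) (hi : 0 ≤ i) (T : PySem.Set (Int × Int × Int))
    (h0 : ((0 : Int), (0 : Int), (0 : Int)) ∉ T) :
    (∃ t ∈ T, isThereASubsets S i t.1 t.2.1 t.2.2 = true) ↔
      (∃ t' ∈ altStep ((PySem.List.pyGet? S i).getD 0) T,
        isThereASubsets S (i - 1) t'.1 t'.2.1 t'.2.2 = true) := by
  set x := (PySem.List.pyGet? S i).getD 0 with hx
  constructor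
  · rintro ⟨t, htT, hA⟩
    have hz : ¬ (t.1 = 0 ∧ t.2.1 = 0 ∧ t.2.2 = 0) := by
      intro hc
      apply h0
      have ht000 : t = ((0 : Int), (0 : Int), (0 : Int)) := by
        obtain ⟨u, v, w⟩ := t; simp only [Prod.mk.injEq]; exact hc
      rwa [ht000] at htT
    rw [A_step' S i t.1 t.2.1 t.2.2 hz hi, ← hx] at hA
    rcases hA with ⟨hg, hr⟩ | ⟨hg, hr⟩ | ⟨hg, hr⟩
    · exact ⟨(t.1 - x, t.2.1, t.2.2), (mem_altStep x T _).mpr ⟨t, htT, Or.inl ⟨hg, rfl⟩⟩, hr⟩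
    · exact ⟨(t.1, t.2.1 - x, t.2.2), (mem_altStep x T _).mpr ⟨t, htT, Or.inr (Or.inl ⟨hg, rfl⟩)⟩, hr⟩
    · exact ⟨(t.1, t.2.1, t.2.2 - x), (mem_altStep x T _).mpr ⟨t, htT, Or.inr (Or.inr ⟨hg, rfl⟩)⟩, hr⟩
  · rintro ⟨t', ht', hA⟩
    rcases (mem_altStep x T t').mp ht' with ⟨t, htT, hsucc⟩
    have hz : ¬ (t.1 = 0 ∧ t.2.1 = 0 ∧ t.2.2 = 0) := by
      intro hc
      apply h0
      have ht000 : t = ((0 : Int), (0 : Int), (0 : Int)) := by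
        obtain ⟨u, v, w⟩ := t; simp only [Prod.mk.injEq]; exact hc
      rwa [ht000] at htT
    refine ⟨t, htT, ?_⟩
    rw [A_step' S i t.1 t.2.1 t.2.2 hz hi, ← hx]
    rcases hsucc with ⟨hg, he⟩ | ⟨hg, he⟩ | ⟨hg, he⟩
    · exact Or.inl ⟨hg, by rw [he] at hA; exact hA⟩
    · exact Or.inr (Or.inl ⟨hg, by rw [he] at hA; exact hA⟩)
    · exact Or.inr (Or.inr ⟨hg, by rw [he] at hA; exact hA⟩)

-- B's loop, run from index i, answers "some state in T is solvable for A's recursion at index i"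
lemma loop_neg (S : List Int) (i : Int) (hi : i < 0) (T : PySem.Set (Int × Int × Int)) :
    (altLoop S i T = true ↔ ∃ t ∈ T, isThereASubsets S i t.1 t.2.1 t.2.2 = true) := by
  rw [altLoop, dif_neg (show ¬ i ≥ 0 by omega)]
  rw [PySem.Set.contains_iff _ _]
  constructor
  · intro h
    exact ⟨(0, 0, 0), h, A_zero S i⟩
  · rintro ⟨t, htT, hA⟩
    by_cases hz : t.1 = 0 ∧ t.2.1 = 0 ∧ t.2.2 = 0
    · have ht000 : t = ((0 : Int), (0 : Int), (0 : Int)) := by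
        obtain ⟨u, v, w⟩ := t; simp only [Prod.mk.injEq]; exact hz
      rwa [ht000] at htT
    · rw [A_neg S i t.1 t.2.1 t.2.2 hz (by omega)] at hA
      exact absurd hA (by simp)

lemma loop_step (S : List Int) (i : Int) (hi : 0 ≤ i) (T : PySem.Set (Int × Int × Int))
    (hrec : altLoop S (i - 1) (altStep ((PySem.List.pyGet? S i).getD 0) T) = true ↔
      ∃ t' ∈ altStep ((PySem.List.pyGet? S i).getD 0) T,
        isThereASubsets S (i - 1) t'.1 t'.2.1 t'.2.2 = true) :
    (altLoop S i T = true ↔ ∃ t ∈ T, isThereASubsets S i t.1 t.2.1 t.2.2 = true) := by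
  rw [altLoop, dif_pos (show i ≥ 0 from hi)]
  by_cases hc : PySem.Set.contains T ((0 : Int), (0 : Int), (0 : Int)) = true
  · simp only [hc, if_true, true_iff]
    exact ⟨(0, 0, 0), (PySem.Set.contains_iff _ _).mp hc, A_zero S i⟩
  · have h0 : ((0 : Int), (0 : Int), (0 : Int)) ∉ T := fun h => hc ((PySem.Set.contains_iff _ _).mpr h)
    simp only [Bool.not_eq_true] at hc
    simp only [hc, Bool.false_eq_true, if_false]
    by_cases he : T.isEmpty
    · simp only [he, if_true]
      have hT : T = [] := List.isEmpty_iff.mp he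
      subst hT; simp
    · simp only [he, Bool.false_eq_true, if_false]
      rw [hrec, ← exists_A_succ S i hi T h0]

lemma loop_iff (S : List Int) : ∀ (m : Nat) (i : Int), i.toNat ≤ m →
    ∀ (T : PySem.Set (Int × Int × Int)),
      (altLoop S i T = true ↔ ∃ t ∈ T, isThereASubsets S i t.1 t.2.1 t.2.2 = true) := by
  intro m
  induction m with
  | zero =>
    intro i hi T
    by_cases h0 : i < 0
    · exact loop_neg S i h0 T
    · have hi0 : i = 0 := by omega
      subst hi0
      exact loop_step S 0 le_rfl T (loop_neg S (0 - 1) (by omega) _)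
  | succ m ih =>
    intro i hi T
    by_cases h0 : i < 0
    · exact loop_neg S i h0 T
    · refine loop_step S i (by omega) T ?_
      by_cases h1 : i - 1 < 0
      · exact loop_neg S (i - 1) h1 _
      · exact ih (i - 1) (by omega) _

-- ===== VERDICT (by name: the statement is the Claim_ definition above) =====
theorem isThereASubsets_spec : Claim_equal_isThereASubsets := by
  intro S n a b c _hDom _hPre
  unfold Spec_isThereASubsets isThereASubsets_alt
  have h := loop_iff S n.toNat n le_rfl (PySem.Set.ofList [(a, b, c)])
  have hsingle : PySem.Set.ofList [((a : Int), (b : Int), (c : Int))] = [(a, b, c)] := rfl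
  rw [hsingle] at h
  simp only [List.mem_singleton] at h
  apply (Bool.coe_iff_coe.mp _).symm
  rw [hsingle, h]
  constructor
  · rintro ⟨t, rfl, hA⟩
    exact hA
  · intro hA
    exact ⟨(a, b, c), rfl, hA⟩
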